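-- pv_equiv track=rewrite | github.com/alexandraback/datacollection | solutions_5753053697277952_0/Python/hwmaltby/senate_evac.py | senate_evac
-- ===== SOURCE A (Python) =====
-- def senate_evac(lst):
--     """
--     Keeps parties as close to parity as possible. Solve time high but within
--     constraints. Last two senators to leave always leave together.
--     """
--     exits = []
--     while sum(lst) > 0:
--         values = max_info(lst)
--         if len(values) == 2:
--             exits.append(chr(values[0] + 65) + chr(values[1] + 65))
--             lst[values[0]] -= 1
--             lst[values[1]] -= 1
--         else:
--             exits.append(chr(values[0] + 65))
--             lst[values[0]] -= 1
--     return ' '.join(exits)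
--
-- def max_info(lst):
--     """
--     Returns the indices that obtain the max value of lst. (Assumed values pos.)
--     """
--     k = []
--     maxm = -1
--     for i in range(len(lst)):
--         if lst[i] == maxm:
--             k.append(i)
--         if lst[i] > maxm:
--             maxm = lst[i]
--             k = [i]
--     return k
--
-- def sum(lst):
--     """
--     Returns the sum of the values in a lst.
--     """
--     total = 0
--     for i in lst:
--         total += i
--     return total
-- ===== SOURCE B (Python) =====
-- def senate_evac(lst):
--     # Priority-queue formulation: keep entries = [(-count, index), ...] as an
--     # ordered sequence (largest count first, lowest index first) and re-insert
--     # decremented entries in place, instead of rescanning the counts each step.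
--     entries = []
--     for i, c in enumerate(lst):
--         _insort(entries, (-c, i))
--     total = sum(lst)
--     out = []
--     while total > 0:
--         e1 = entries.pop(0)
--         if entries and entries[0][0] == e1[0] and (len(entries) < 2 or entries[1][0] != e1[0]):
--             # exactly two parties share the maximum: they leave together
--             e2 = entries.pop(0)
--             out.append(chr(e1[1] + 65) + chr(e2[1] + 65))
--             _insort(entries, (e1[0] + 1, e1[1]))
--             _insort(entries, (e2[0] + 1, e2[1]))
--             total -= 2
--         else:
--             out.append(chr(e1[1] + 65))
--             _insort(entries, (e1[0] + 1, e1[1]))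
--             total -= 1
--     return ' '.join(out)
--
-- def _insort(entries, x):
--     lo = 0
--     while lo < len(entries) and entries[lo] <= x:
--         lo += 1
--     entries.insert(lo, x)
-- ===== Notes on version B (the rewrite author's own statement) =====
-- stated objective: alternative
-- what changed: A rescans the whole list every step (full re-sum plus a scan building the argmax-index list); B instead keeps a priority queue of (-count, index) entries as an ordered sequence, popping the front (and, when exactly two parties tie for the max, the second entry) and re-inserting the decremented entries in place, with a running total instead of re-summing.
import Mathlib
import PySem

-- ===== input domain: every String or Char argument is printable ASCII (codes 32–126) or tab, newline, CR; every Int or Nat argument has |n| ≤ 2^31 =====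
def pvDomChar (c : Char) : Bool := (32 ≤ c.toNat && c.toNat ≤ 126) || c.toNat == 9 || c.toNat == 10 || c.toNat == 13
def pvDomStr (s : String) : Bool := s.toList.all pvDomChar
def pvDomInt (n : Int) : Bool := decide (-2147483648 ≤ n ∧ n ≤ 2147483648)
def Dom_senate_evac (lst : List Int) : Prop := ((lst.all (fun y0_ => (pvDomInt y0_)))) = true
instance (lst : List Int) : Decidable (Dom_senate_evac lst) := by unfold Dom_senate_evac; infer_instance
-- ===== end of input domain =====

-- B replaces A's per-step rescan of the counts (re-sum + argmax-index list) by a priority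
-- queue kept as an ordered (-count, index) sequence with in-place re-insertion of the
-- decremented entries; equivalence is about the RETURN value only (Python A mutates its
-- argument in place, B does not).

-- shared helper: the (index, value) pairs a Python 'for i, c in enumerate(lst)' /
-- 'for i in range(len(lst))' loop reads
def pyEnumFrom (n : Nat) : List Int → List (Nat × Int)
  | [] => []
  | c :: cs => (n, c) :: pyEnumFrom (n + 1) cs

-- ===== PORT A =====
def sumA (lst : List Int) : Int :=
  lst.foldl (fun total i => total + i) 0

def maxInfoAux : List (Nat × Int) → List Nat → Int → List Nat
  | [], k, _ => k
  | (i, v) :: rest, k, maxm =>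
    -- Python runs both ifs in sequence: append on equality, then reset on strict increase
    let k1 := if v = maxm then k ++ [i] else k
    if v > maxm then maxInfoAux rest [i] v else maxInfoAux rest k1 maxm

def max_info (lst : List Int) : List Nat :=
  maxInfoAux (pyEnumFrom 0 lst) [] (-1)

-- the while loop, with fuel (sum lst).toNat: each iteration taken decreases the sum by ≥ 1,
-- so this fuel is exhausted only when the Python loop has already stopped
def senateLoopA : Nat → List Int → List String → List String
  | 0, _, exits => exits
  | fuel + 1, lst, exits =>
    if sumA lst > 0 then
      let values := max_info lst
      if values.length = 2 then
        let i := values.getD 0 0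
        let j := values.getD 1 0
        let lst1 := lst.set i (lst.getD i 0 - 1)
        let lst2 := lst1.set j (lst1.getD j 0 - 1)
        senateLoopA fuel lst2 (exits ++ [String.ofList [Char.ofNat (i + 65), Char.ofNat (j + 65)]])
      else
        let i := values.getD 0 0
        senateLoopA fuel (lst.set i (lst.getD i 0 - 1)) (exits ++ [String.ofList [Char.ofNat (i + 65)]])
    else exits

def senate_evac (lst : List Int) : String :=
  PySem.Str.join " " (senateLoopA (sumA lst).toNat lst [])

-- ===== PORT B =====
-- Python tuple comparison 'entries[lo] <= x' on (int, int) pairs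
def pvKle (x y : Int × Nat) : Bool := decide (x.1 < y.1 ∨ (x.1 = y.1 ∧ x.2 ≤ y.2))

-- Source B's _insort: insert x after every entry ≤ x (keeps the list sorted)
def insortB (x : Int × Nat) : List (Int × Nat) → List (Int × Nat)
  | [] => [x]
  | y :: ys => if pvKle y x then y :: insortB x ys else x :: y :: ys

def buildEntries (lst : List Int) : List (Int × Nat) :=
  (pyEnumFrom 0 lst).foldl (fun acc p => insortB (-p.2, p.1) acc) []

-- the while loop, with fuel total.toNat (each iteration taken decreases total by ≥ 1)
def senateLoopB : Nat → List (Int × Nat) → Int → List String → List String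
  | 0, _, _, out => out
  | fuel + 1, entries, total, out =>
    if total > 0 then
      match entries with
      | [] => out   -- unreachable while total > 0
      | [e1] =>
        senateLoopB fuel (insortB (e1.1 + 1, e1.2) []) (total - 1)
          (out ++ [String.ofList [Char.ofNat (e1.2 + 65)]])
      | e1 :: e2 :: rest2 =>
        if e2.1 == e1.1 && (match rest2 with | [] => true | e3 :: _ => e3.1 != e1.1) then
          senateLoopB fuel (insortB (e2.1 + 1, e2.2) (insortB (e1.1 + 1, e1.2) rest2)) (total - 2)
            (out ++ [String.ofList [Char.ofNat (e1.2 + 65), Char.ofNat (e2.2 + 65)]])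
        else
          senateLoopB fuel (insortB (e1.1 + 1, e1.2) (e2 :: rest2)) (total - 1)
            (out ++ [String.ofList [Char.ofNat (e1.2 + 65)]])
    else out

def senate_evac_alt (lst : List Int) : String :=
  PySem.Str.join " " (senateLoopB lst.sum.toNat (buildEntries lst) lst.sum [])

-- ===== PRECONDITION & SPEC =====
def Spec_senate_evac (lst : List Int) (out : String) : Prop := out = senate_evac_alt lst
instance (lst : List Int) (out : String) : Decidable (Spec_senate_evac lst out) := by unfold Spec_senate_evac; infer_instance

-- ===== CLAIM (what is proved, stated in full; the proofs are below) =====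
def Claim_equal_senate_evac : Prop := ∀ (lst : List Int), Dom_senate_evac lst → Spec_senate_evac lst (senate_evac lst)

-- ===== LEMMAS AND PROOFS =====

-- proof-side notions: running maximum, pairs (-count, index), index list of the maxima
def Mx (lst : List Int) (a : Int) : Int := lst.foldl max a

def PPairs (lst : List Int) : List (Int × Nat) :=
  (pyEnumFrom 0 lst).map (fun p => (-p.2, p.1))

def Kix (lst : List Int) : List Nat :=
  ((pyEnumFrom 0 lst).filter (fun p => p.2 == Mx lst (-1))).map Prod.fst

-- the Prop behind pvKle
def lexle (x y : Int × Nat) : Prop := x.1 < y.1 ∨ (x.1 = y.1 ∧ x.2 ≤ y.2)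

lemma pvKle_iff (x y : Int × Nat) : pvKle x y = true ↔ lexle x y := by
  simp [pvKle, lexle]

lemma lexle_antisymm {x y : Int × Nat} (h1 : lexle x y) (h2 : lexle y x) : x = y := by
  rcases x with ⟨a, i⟩; rcases y with ⟨b, j⟩
  unfold lexle at h1 h2
  simp only at h1 h2
  have : a = b ∧ i = j := by omega
  simp [this.1, this.2]

-- ---- sum lemmas ----
lemma foldl_add_acc : ∀ (l : List Int) (a : Int),
    l.foldl (fun t i => t + i) a = a + l.foldl (fun t i => t + i) 0 := by
  intro l
  induction l with
  | nil => intro a; simp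
  | cons c cs ih =>
    intro a
    simp only [List.foldl]
    rw [ih (a + c), ih (0 + c)]
    ring

lemma sumA_cons (c : Int) (cs : List Int) : sumA (c :: cs) = c + sumA cs := by
  simp only [sumA, List.foldl]
  rw [foldl_add_acc]
  ring_nf

lemma sumA_eq_sum : ∀ (l : List Int), sumA l = l.sum := by
  intro l
  induction l with
  | nil => simp [sumA]
  | cons c cs ih => rw [sumA_cons, ih, List.sum_cons]

lemma sumA_set : ∀ (l : List Int) (i : Nat) (a : Int), i < l.length →
    sumA (l.set i a) = sumA l - l.getD i 0 + a := by
  intro l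
  induction l with
  | nil => intro i a h; simp at h
  | cons c cs ih =>
    intro i a h
    cases i with
    | zero => simp [sumA_cons]; ring
    | succ j =>
      simp only [List.set, sumA_cons, List.getD, List.getElem?_cons_succ]
      have hj : j < cs.length := by simpa using h
      rw [ih j a hj]
      simp [List.getD]
      ring

lemma sumA_pos_exists : ∀ (l : List Int), 0 < sumA l → ∃ x ∈ l, 1 ≤ x := by
  intro l
  induction l with
  | nil => intro h; simp [sumA] at h
  | cons c cs ih =>
    intro h
    rw [sumA_cons] at h
    by_cases hc : 1 ≤ c
    · exact ⟨c, by simp, hc⟩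
    · have : 0 < sumA cs := by omega
      obtain ⟨x, hx, h1⟩ := ih this
      exact ⟨x, by simp [hx], h1⟩

-- ---- Mx lemmas ----
lemma le_Mx : ∀ (l : List Int) (a : Int), a ≤ Mx l a := by
  intro l
  induction l with
  | nil => intro a; simp [Mx]
  | cons c cs ih =>
    intro a
    have := ih (max a c)
    simp only [Mx, List.foldl] at this ⊢
    exact le_trans (le_max_left a c) this

lemma mem_le_Mx : ∀ (l : List Int) (a v : Int), v ∈ l → v ≤ Mx l a := by
  intro l
  induction l with
  | nil => intro a v hv; simp at hv
  | cons c cs ih =>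
    intro a v hv
    rcases List.mem_cons.mp hv with rfl | hv
    · exact le_trans (le_max_right a v) (le_Mx cs (max a v))
    · exact ih (max a c) v hv

lemma Mx_mem_or : ∀ (l : List Int) (a : Int), Mx l a = a ∨ Mx l a ∈ l := by
  intro l
  induction l with
  | nil => intro a; left; rfl
  | cons c cs ih =>
    intro a
    rcases ih (max a c) with h | h
    · simp only [Mx, List.foldl] at *
      rcases max_cases a c with ⟨he, _⟩ | ⟨he, _⟩
      · left; rw [h, he]
      · right; rw [h, he]; simp
    · right; simp only [Mx, List.foldl] at *; simp [h]

-- ---- pyEnumFrom lemmas ----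
lemma length_pyEnum : ∀ (l : List Int) (n : Nat), (pyEnumFrom n l).length = l.length := by
  intro l
  induction l with
  | nil => intro n; rfl
  | cons c cs ih => intro n; simp [pyEnumFrom, ih]

lemma getElem_pyEnum : ∀ (l : List Int) (n i : Nat) (h : i < l.length),
    (pyEnumFrom n l)[i]'(by rw [length_pyEnum]; exact h) = (n + i, l[i]) := by
  intro l
  induction l with
  | nil => intro n i h; simp at h
  | cons c cs ih =>
    intro n i h
    cases i with
    | zero => simp [pyEnumFrom]
    | succ j =>
      have hj : j < cs.length := by simpa using h
      simp only [pyEnumFrom, List.getElem_cons_succ]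
      rw [ih (n+1) j hj]
      simp
      omega

lemma pyEnum_set : ∀ (l : List Int) (n i : Nat) (a : Int),
    pyEnumFrom n (l.set i a) = (pyEnumFrom n l).set i (n + i, a) := by
  intro l
  induction l with
  | nil => intro n i a; rfl
  | cons c cs ih =>
    intro n i a
    cases i with
    | zero => simp [pyEnumFrom]
    | succ j =>
      simp only [List.set, pyEnumFrom, ih (n+1) j a]
      have : n + 1 + j = n + (j + 1) := by omega
      rw [this]

lemma mem_pyEnum : ∀ (l : List Int) (n : Nat) (p : Nat × Int), p ∈ pyEnumFrom n l →
    ∃ j, ∃ h : j < l.length, p = (n + j, l[j]) := by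
  intro l
  induction l with
  | nil => intro n p hp; simp [pyEnumFrom] at hp
  | cons c cs ih =>
    intro n p hp
    rcases List.mem_cons.mp hp with rfl | hp
    · exact ⟨0, by simp, by simp⟩
    · obtain ⟨j, hj, he⟩ := ih (n+1) p hp
      exact ⟨j + 1, by simpa using hj, by rw [he]; simp; omega⟩

lemma pyEnum_mem_of : ∀ (l : List Int) (n j : Nat) (h : j < l.length),
    (n + j, l[j]) ∈ pyEnumFrom n l := by
  intro l
  induction l with
  | nil => intro n j h; simp at h
  | cons c cs ih =>
    intro n j h
    cases j with
    | zero => simp [pyEnumFrom]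
    | succ i =>
      have hi : i < cs.length := by simpa using h
      have := ih (n+1) i hi
      simp only [pyEnumFrom, List.mem_cons]
      right
      have : n + (i + 1) = n + 1 + i := by omega
      rw [this]
      exact ih (n+1) i hi

lemma pairwise_pyEnum : ∀ (l : List Int) (n : Nat),
    (pyEnumFrom n l).Pairwise (fun a b => a.1 < b.1) := by
  intro l
  induction l with
  | nil => intro n; simp [pyEnumFrom]
  | cons c cs ih =>
    intro n
    simp only [pyEnumFrom, List.pairwise_cons]
    constructor
    · intro p hp
      obtain ⟨j, hj, he⟩ := mem_pyEnum cs (n+1) p hp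
      rw [he]; simp; omega
    · exact ih (n+1)

-- ---- max_info characterization ----
lemma maxInfoAux_eq : ∀ (cs : List Int) (n : Nat) (k : List Nat) (maxm : Int),
    maxInfoAux (pyEnumFrom n cs) k maxm =
      (if Mx cs maxm = maxm then k else []) ++
        ((pyEnumFrom n cs).filter (fun p => p.2 == Mx cs maxm)).map Prod.fst := by
  intro cs
  induction cs with
  | nil => intro n k maxm; simp [pyEnumFrom, maxInfoAux, Mx]
  | cons c cs' ih =>
    intro n k maxm
    have hMx : Mx (c :: cs') maxm = Mx cs' (max maxm c) := rfl
    by_cases hgt : c > maxm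
    · have hne : ¬ (c = maxm) := by omega
      have hle : c ≤ Mx cs' c := le_Mx cs' c
      have hM : Mx (c :: cs') maxm = Mx cs' c := by
        rw [hMx, max_eq_right (by omega : maxm ≤ c)]
      simp only [pyEnumFrom, maxInfoAux, if_neg hne, if_pos hgt, hM, List.filter_cons]
      rw [ih (n+1) [n] c]
      rw [if_neg (show ¬ Mx cs' c = maxm by omega)]
      by_cases he : c = Mx cs' c
      · have hb : (c == Mx cs' c) = true := by simpa using he
        rw [if_pos he.symm]
        simp [hb]
      · have hb : (c == Mx cs' c) = false := by simpa using he
        rw [if_neg (fun h => he h.symm)]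
        simp [hb]
    · by_cases heq : c = maxm
      · subst heq
        have hM : Mx (c :: cs') c = Mx cs' c := by
          rw [hMx, max_self]
        have hle : c ≤ Mx cs' c := le_Mx cs' c
        simp only [pyEnumFrom, maxInfoAux, if_true, if_neg hgt, hM,
          List.filter_cons]
        rw [ih (n+1) (k ++ [n]) c]
        by_cases he : Mx cs' c = c
        · have hb : (c == Mx cs' c) = true := by simp [he]
          simp [he, List.append_assoc]
        · have hb : (c == Mx cs' c) = false := by simpa using fun h => he h.symm
          simp [he, hb]
      · have hlt : c < maxm := by omega
        have hM : Mx (c :: cs') maxm = Mx cs' maxm := by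
          rw [hMx, max_eq_left (by omega : c ≤ maxm)]
        have hle : maxm ≤ Mx cs' maxm := le_Mx cs' maxm
        simp only [pyEnumFrom, maxInfoAux, if_neg heq, if_neg hgt, hM, List.filter_cons]
        rw [ih (n+1) k maxm]
        have hb : (c == Mx cs' maxm) = false := by
          simp only [beq_eq_false_iff_ne, ne_eq]; omega
        simp [hb]

lemma max_info_eq_Kix (lst : List Int) : max_info lst = Kix lst := by
  unfold max_info Kix
  rw [maxInfoAux_eq lst 0 [] (-1)]
  by_cases h : Mx lst (-1) = -1 <;> simp [h]

-- ---- insort lemmas ----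
lemma insort_perm : ∀ (l : List (Int × Nat)) (x : Int × Nat), (insortB x l).Perm (x :: l) := by
  intro l
  induction l with
  | nil => intro x; simp [insortB]
  | cons y ys ih =>
    intro x
    simp only [insortB]
    by_cases h : pvKle y x = true
    · rw [if_pos h]
      exact ((ih x).cons y).trans (List.Perm.swap x y ys)
    · rw [if_neg h]

lemma mem_insort {l : List (Int × Nat)} {x p : Int × Nat} (hp : p ∈ insortB x l) :
    p = x ∨ p ∈ l := by
  have := (insort_perm l x).mem_iff.mp hp
  simpa using this

lemma lexle_trans {x y z : Int × Nat} (h1 : lexle x y) (h2 : lexle y z) : lexle x z := by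
  unfold lexle at *
  omega

lemma lexle_of_not_kle {x y : Int × Nat} (h : ¬ pvKle y x = true) : lexle x y := by
  rw [pvKle_iff] at h
  unfold lexle at h ⊢
  omega

lemma insort_sorted : ∀ (l : List (Int × Nat)) (x : Int × Nat),
    l.Pairwise lexle → (insortB x l).Pairwise lexle := by
  intro l
  induction l with
  | nil => intro x _; simp [insortB]
  | cons y ys ih =>
    intro x hs
    rcases List.pairwise_cons.mp hs with ⟨hy, hys⟩
    simp only [insortB]
    by_cases h : pvKle y x = true
    · rw [if_pos h]
      refine List.pairwise_cons.mpr ⟨?_, ih x hys⟩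
      intro p hp
      rcases mem_insort hp with rfl | hp
      · exact (pvKle_iff y p).mp h
      · exact hy p hp
    · rw [if_neg h]
      refine List.pairwise_cons.mpr ⟨?_, hs⟩
      intro p hp
      rcases List.mem_cons.mp hp with rfl | hp
      · exact lexle_of_not_kle h
      · exact lexle_trans (lexle_of_not_kle h) (hy p hp)

lemma foldl_insort_perm : ∀ (l : List (Nat × Int)) (acc : List (Int × Nat)),
    (l.foldl (fun acc p => insortB (-p.2, p.1) acc) acc).Perm
      (acc ++ l.map (fun p => (-p.2, p.1))) := by
  intro l
  induction l with
  | nil => intro acc; simp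
  | cons p ps ih =>
    intro acc
    simp only [List.foldl, List.map_cons]
    refine (ih (insortB (-p.2, p.1) acc)).trans ?_
    exact (((insort_perm acc (-p.2, p.1)).append_right _).trans List.perm_middle.symm)

lemma build_perm (lst : List Int) : (buildEntries lst).Perm (PPairs lst) := by
  unfold buildEntries PPairs
  simpa using foldl_insort_perm (pyEnumFrom 0 lst) []

lemma foldl_insort_sorted : ∀ (l : List (Nat × Int)) (acc : List (Int × Nat)),
    acc.Pairwise lexle →
    (l.foldl (fun acc p => insortB (-p.2, p.1) acc) acc).Pairwise lexle := by
  intro l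
  induction l with
  | nil => intro acc h; exact h
  | cons p ps ih =>
    intro acc h
    exact ih _ (insort_sorted acc _ h)

lemma build_sorted (lst : List Int) : (buildEntries lst).Pairwise lexle := by
  exact foldl_insort_sorted (pyEnumFrom 0 lst) [] (by simp)

-- ---- structure of a sorted permutation of PPairs ----
lemma Kix_mem (lst : List Int) (k : Nat) (hk : k ∈ Kix lst) :
    k < lst.length ∧ lst.getD k 0 = Mx lst (-1) := by
  unfold Kix at hk
  obtain ⟨p, hp, hpe⟩ := List.mem_map.mp hk
  obtain ⟨hpm, hpq⟩ := List.mem_filter.mp hp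
  obtain ⟨j, hj, rfl⟩ := mem_pyEnum lst 0 p hpm
  simp only [Nat.zero_add] at hpe
  simp only [beq_iff_eq] at hpq
  subst hpe
  exact ⟨hj, by rw [List.getD_eq_getElem lst 0 hj]; exact hpq⟩

lemma Kix_pairwise (lst : List Int) : (Kix lst).Pairwise (· < ·) := by
  unfold Kix
  rw [List.pairwise_map]
  exact (pairwise_pyEnum lst 0).filter _

lemma Kix_ne_nil (lst : List Int) (hpos : 0 < sumA lst) : Kix lst ≠ [] := by
  obtain ⟨v, hv, h1⟩ := sumA_pos_exists lst hpos
  have hm1 : 1 ≤ Mx lst (-1) := le_trans h1 (mem_le_Mx lst (-1) v hv)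
  have hmem : Mx lst (-1) ∈ lst := by
    rcases Mx_mem_or lst (-1) with h | h
    · omega
    · exact h
  obtain ⟨j, hj, hje⟩ := List.mem_iff_getElem.mp hmem
  have hin : (0 + j, lst[j]) ∈ pyEnumFrom 0 lst := pyEnum_mem_of lst 0 j hj
  have : j ∈ Kix lst := by
    unfold Kix
    refine List.mem_map.mpr ⟨(0 + j, lst[j]), List.mem_filter.mpr ⟨hin, by simp [hje]⟩, by simp⟩
  exact List.ne_nil_of_mem this

lemma PPairs_getElem (lst : List Int) (k : Nat) (hk : k < lst.length) :
    (PPairs lst)[k]'(by unfold PPairs; rw [List.length_map, length_pyEnum]; exact hk)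
      = (-(lst.getD k 0), k) := by
  unfold PPairs
  rw [List.getElem_map]
  have := getElem_pyEnum lst 0 k hk
  rw [this]
  simp [(List.getD_eq_getElem lst 0 hk).symm, List.getD]

lemma perm_set_cons (lst : List Int) (k : Nat) (a : Int) (restE : List (Int × Nat))
    (hk : k < lst.length)
    (hperm : (PPairs lst).Perm ((-(lst.getD k 0), k) :: restE)) :
    (PPairs (lst.set k a)).Perm ((-a, k) :: restE) := by
  have hkP : k < (PPairs lst).length := by
    unfold PPairs; rw [List.length_map, length_pyEnum]; exact hk
  have hset : PPairs (lst.set k a) = (PPairs lst).set k (-a, k) := by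
    unfold PPairs
    rw [pyEnum_set lst 0 k a, List.map_set]
    simp
  have h1 : (PPairs (lst.set k a)).Perm ((-a, k) :: (PPairs lst).eraseIdx k) := by
    rw [hset]; exact List.set_perm_cons_eraseIdx hkP _
  refine h1.trans (List.Perm.cons _ ?_)
  have h2 : (PPairs lst).Perm ((-(lst.getD k 0), k) :: (PPairs lst).eraseIdx k) := by
    have := (List.getElem_cons_eraseIdx_perm hkP).symm
    rwa [PPairs_getElem lst k hk] at this
  exact (h2.symm.trans hperm).cons_inv

lemma snd_mem_pyEnum : ∀ (l : List Int) (n : Nat) (p : Nat × Int), p ∈ pyEnumFrom n l → p.2 ∈ l := by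
  intro l n p hp
  obtain ⟨j, hj, rfl⟩ := mem_pyEnum l n p hp
  simp

lemma sorted_perm_eq {l1 l2 : List (Int × Nat)} (hp : l1.Perm l2)
    (h1 : l1.Pairwise lexle) (h2 : l2.Pairwise lexle) : l1 = l2 :=
  List.Perm.eq_of_pairwise (fun _ _ _ _ ha hb => lexle_antisymm ha hb) h1 h2 hp

lemma filter_PPairs (lst : List Int) (m : Int) :
    (PPairs lst).filter (fun p => p.1 == -m) =
      ((pyEnumFrom 0 lst).filter (fun p => p.2 == m)).map (fun p => (-m, p.1)) := by
  unfold PPairs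
  rw [List.filter_map]
  have hpred : ((fun p : Int × Nat => p.1 == -m) ∘ (fun p : Nat × Int => (-p.2, p.1)))
      = fun p : Nat × Int => p.2 == m := by
    funext p
    simp [Function.comp]
  rw [hpred]
  refine List.map_eq_map_iff.mpr ?_
  intro p hp
  have := (List.mem_filter.mp hp).2
  simp only [beq_iff_eq] at this
  simp [this]

lemma block_pairwise (lst : List Int) (m : Int) :
    ((Kix lst).map (fun i => (-m, i))).Pairwise lexle := by
  rw [List.pairwise_map]
  exact (Kix_pairwise lst).imp (fun h => Or.inr ⟨rfl, le_of_lt h⟩)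

lemma entries_shape (lst : List Int) (entries : List (Int × Nat))
    (hs : entries.Pairwise lexle) (hP : entries.Perm (PPairs lst)) :
    ∃ d, entries = ((Kix lst).map (fun i => (-(Mx lst (-1)), i))) ++ d ∧
      d.Pairwise lexle ∧ ∀ p ∈ d, -(Mx lst (-1)) < p.1 := by
  have hub : ∀ p ∈ entries, -(Mx lst (-1)) ≤ p.1 := by
    intro p hp
    have hmem : p ∈ PPairs lst := hP.mem_iff.mp hp
    unfold PPairs at hmem
    obtain ⟨e, he, rfl⟩ := List.mem_map.mp hmem
    have := mem_le_Mx lst (-1) e.2 (snd_mem_pyEnum lst 0 e he)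
    simp only
    omega
  have hd : ∀ p ∈ entries.dropWhile (fun p => p.1 == -(Mx lst (-1))), -(Mx lst (-1)) < p.1 := by
    cases hD : entries.dropWhile (fun p => p.1 == -(Mx lst (-1))) with
    | nil => simp
    | cons h0 d' =>
      intro p hp0
      have hdsub := List.dropWhile_sublist (l := entries) (fun p => p.1 == -(Mx lst (-1)))
      have hh0mem : h0 ∈ entries := hdsub.subset (by rw [hD]; simp)
      have hne : entries.dropWhile (fun p => p.1 == -(Mx lst (-1))) ≠ [] := by simp [hD]
      have hh0q := List.head_dropWhile_not (l := entries)
        (p := fun p => p.1 == -(Mx lst (-1))) hne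
      simp only [hD, List.head_cons, beq_eq_false_iff_ne, ne_eq] at hh0q
      have hh0 : -(Mx lst (-1)) < h0.1 := by
        have := hub h0 hh0mem
        omega
      rcases List.mem_cons.mp hp0 with rfl | hp'
      · exact hh0
      · have hdp : (h0 :: d').Pairwise lexle := by
          rw [← hD]; exact hs.sublist hdsub
        have := (List.pairwise_cons.mp hdp).1 p hp'
        unfold lexle at this
        omega
  have hfilter_d : (entries.dropWhile (fun p => p.1 == -(Mx lst (-1)))).filter
      (fun p => p.1 == -(Mx lst (-1))) = [] := by
    rw [List.filter_eq_nil_iff]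
    intro a ha
    have := hd a ha
    simp only [beq_iff_eq]
    omega
  have hfilter_t : (entries.takeWhile (fun p => p.1 == -(Mx lst (-1)))).filter
      (fun p => p.1 == -(Mx lst (-1))) = entries.takeWhile (fun p => p.1 == -(Mx lst (-1))) := by
    rw [List.filter_eq_self]
    intro a ha
    exact List.mem_takeWhile_imp (p := fun p : Int × Nat => p.1 == -(Mx lst (-1))) ha
  have hfe : entries.filter (fun p => p.1 == -(Mx lst (-1)))
      = entries.takeWhile (fun p => p.1 == -(Mx lst (-1))) := by
    conv_lhs => rw [← entries.takeWhile_append_dropWhile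
      (p := fun p => p.1 == -(Mx lst (-1)))]
    rw [List.filter_append, hfilter_t, hfilter_d, List.append_nil]
  have hKmap : ((Kix lst).map (fun i => (-(Mx lst (-1)), i)))
      = ((pyEnumFrom 0 lst).filter (fun p => p.2 == Mx lst (-1))).map
          (fun p => (-(Mx lst (-1)), p.1)) := by
    unfold Kix
    rw [List.map_map]
    rfl
  have hperm_t : (entries.takeWhile (fun p => p.1 == -(Mx lst (-1)))).Perm
      ((Kix lst).map (fun i => (-(Mx lst (-1)), i))) := by
    rw [← hfe, hKmap, ← filter_PPairs lst (Mx lst (-1))]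
    exact hP.filter _
  have ht_sorted := hs.sublist (List.takeWhile_sublist (fun p => p.1 == -(Mx lst (-1))))
  have hteq : entries.takeWhile (fun p => p.1 == -(Mx lst (-1)))
      = (Kix lst).map (fun i => (-(Mx lst (-1)), i)) :=
    sorted_perm_eq hperm_t ht_sorted (block_pairwise lst (Mx lst (-1)))
  refine ⟨entries.dropWhile (fun p => p.1 == -(Mx lst (-1))), ?_,
    hs.sublist (List.dropWhile_sublist _), hd⟩
  rw [← hteq, List.takeWhile_append_dropWhile]


-- ---- the loops agree ----
lemma loop_eq : ∀ (fuel : Nat) (lst : List Int) (entries : List (Int × Nat)) (exits : List String),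
    entries.Pairwise lexle → entries.Perm (PPairs lst) →
    senateLoopB fuel entries (sumA lst) exits = senateLoopA fuel lst exits := by
  intro fuel
  induction fuel with
  | zero => intro lst entries exits _ _; rfl
  | succ f ih =>
    intro lst entries exits hs hP
    by_cases hpos : 0 < sumA lst
    · obtain ⟨d, hE, hdp, hdlt⟩ := entries_shape lst entries hs hP
      have hKne := Kix_ne_nil lst hpos
      have hMI : max_info lst = Kix lst := max_info_eq_Kix lst
      -- the shared single-removal step
      have hsingle : ∀ (k : Nat) (tail : List (Int × Nat)), k < lst.length →
          lst.getD k 0 = Mx lst (-1) → tail.Pairwise lexle →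
          (((-(Mx lst (-1)), k) : Int × Nat) :: tail).Perm (PPairs lst) → ∀ (ex : List String),
          senateLoopB f (insortB (-(Mx lst (-1)) + 1, k) tail) (sumA lst - 1) ex
            = senateLoopA f (lst.set k (lst.getD k 0 - 1)) ex := by
        intro k tail hklen hkget htail hperm ex
        have hp1 : (PPairs lst).Perm ((-(lst.getD k 0), k) :: tail) := by
          rw [hkget]; exact hperm.symm
        have hp2 := perm_set_cons lst k (lst.getD k 0 - 1) tail hklen hp1
        have hneg : -(lst.getD k 0 - 1) = -(Mx lst (-1)) + 1 := by rw [hkget]; ring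
        rw [hneg] at hp2
        have hperm' : (insortB (-(Mx lst (-1)) + 1, k) tail).Perm
            (PPairs (lst.set k (lst.getD k 0 - 1))) :=
          (insort_perm tail _).trans hp2.symm
        have hsum : sumA (lst.set k (lst.getD k 0 - 1)) = sumA lst - 1 := by
          rw [sumA_set lst k _ hklen]; ring
        have := ih (lst.set k (lst.getD k 0 - 1)) _ ex (insort_sorted tail _ htail) hperm'
        rw [hsum] at this
        exact this
      cases hK : Kix lst with
      | nil => exact absurd hK hKne
      | cons k0 K' =>
        have hk0 := Kix_mem lst k0 (by rw [hK]; simp)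
        have hvals : max_info lst = k0 :: K' := by rw [hMI, hK]
        cases K' with
        | nil =>
          -- unique maximum: one senator leaves
          have hEe : entries = (-(Mx lst (-1)), k0) :: d := by rw [hE, hK]; rfl
          have hperm0 : (((-(Mx lst (-1)), k0) : Int × Nat) :: d).Perm (PPairs lst) := by
            rw [← hEe]; exact hP
          have hred := hsingle k0 d hk0.1 hk0.2 hdp hperm0
            (exits ++ [String.ofList [Char.ofNat (k0 + 65)]])
          cases hd0 : d with
          | nil =>
            simp only [senateLoopA, senateLoopB, hEe, hd0, if_pos hpos, hvals]
            exact hd0 ▸ hred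
          | cons e2 d2 =>
            have he2 : -(Mx lst (-1)) < e2.1 := hdlt e2 (by rw [hd0]; simp)
            have hcond : (e2.1 == (-(Mx lst (-1)) : Int)) = false := by
              simp only [beq_eq_false_iff_ne, ne_eq]; omega
            simp only [senateLoopA, senateLoopB, hEe, hd0, if_pos hpos, hvals,
              hcond, Bool.false_and]
            exact hd0 ▸ hred
        | cons k1 K'' =>
          have hk1 := Kix_mem lst k1 (by rw [hK]; simp)
          cases K'' with
          | nil =>
            -- exactly two maxima: they leave together
            have hk01 : k0 < k1 := by
              have hpw := Kix_pairwise lst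
              rw [hK] at hpw
              exact (List.pairwise_cons.mp hpw).1 k1 (by simp)
            have hEe : entries = (-(Mx lst (-1)), k0) :: (-(Mx lst (-1)), k1) :: d := by
              rw [hE, hK]; rfl
            have hk1len1 : k1 < (lst.set k0 (lst.getD k0 0 - 1)).length := by
              rw [List.length_set]; exact hk1.1
            have hget1 : (lst.set k0 (lst.getD k0 0 - 1)).getD k1 0 = Mx lst (-1) := by
              rw [← hk1.2]
              simp [List.getD, List.getElem?_set_ne (by omega : k0 ≠ k1)]
            have hp1 : (PPairs lst).Perm
                ((-(lst.getD k0 0), k0) :: (-(Mx lst (-1)), k1) :: d) := by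
              rw [hk0.2, ← hEe]; exact hP.symm
            have hp2 := perm_set_cons lst k0 (lst.getD k0 0 - 1) _ hk0.1 hp1
            have hneg : -(lst.getD k0 0 - 1) = -(Mx lst (-1)) + 1 := by rw [hk0.2]; ring
            rw [hneg] at hp2
            have hp3 : (PPairs (lst.set k0 (lst.getD k0 0 - 1))).Perm
                ((-((lst.set k0 (lst.getD k0 0 - 1)).getD k1 0), k1)
                  :: (-(Mx lst (-1)) + 1, k0) :: d) := by
              rw [hget1]
              exact hp2.trans (List.Perm.swap _ _ _)
            have hp4 := perm_set_cons (lst.set k0 (lst.getD k0 0 - 1)) k1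
              ((lst.set k0 (lst.getD k0 0 - 1)).getD k1 0 - 1) _ hk1len1 hp3
            have hneg1 : -((lst.set k0 (lst.getD k0 0 - 1)).getD k1 0 - 1)
                = -(Mx lst (-1)) + 1 := by rw [hget1]; ring
            rw [hneg1] at hp4
            have hBperm : (insortB (-(Mx lst (-1)) + 1, k1)
                (insortB (-(Mx lst (-1)) + 1, k0) d)).Perm
                (PPairs ((lst.set k0 (lst.getD k0 0 - 1)).set k1
                  ((lst.set k0 (lst.getD k0 0 - 1)).getD k1 0 - 1))) := by
              refine ((insort_perm _ _).trans ?_).trans hp4.symm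
              exact List.Perm.cons _ (insort_perm _ _)
            have hBsort := insort_sorted _ (-(Mx lst (-1)) + 1, k1)
              (insort_sorted d (-(Mx lst (-1)) + 1, k0) hdp)
            have hsum2 : sumA ((lst.set k0 (lst.getD k0 0 - 1)).set k1
                ((lst.set k0 (lst.getD k0 0 - 1)).getD k1 0 - 1)) = sumA lst - 2 := by
              rw [sumA_set _ _ _ hk1len1, sumA_set _ _ _ hk0.1]; ring
            have hcond2 : ∀ (dd : List (Int × Nat)), (∀ p ∈ dd, -(Mx lst (-1)) < p.1) →
                (match dd with
                  | [] => true
                  | e3 :: _ => e3.1 != (-(Mx lst (-1)) : Int)) = true := by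
              intro dd hdd
              cases dd with
              | nil => rfl
              | cons e3 d3 =>
                have := hdd e3 (by simp)
                simp only [bne_iff_ne, ne_eq]
                omega
            simp only [senateLoopA, senateLoopB, hEe, if_pos hpos, hvals,
              BEq.rfl, Bool.true_and, hcond2 d hdlt, if_true]
            have := ih ((lst.set k0 (lst.getD k0 0 - 1)).set k1
                ((lst.set k0 (lst.getD k0 0 - 1)).getD k1 0 - 1)) _
              (exits ++ [String.ofList [Char.ofNat (k0 + 65), Char.ofNat (k1 + 65)]])
              hBsort hBperm
            rw [hsum2] at this
            exact this
          | cons k2 K3 =>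
            -- three or more maxima: only the first leaves
            have hEe : entries = (-(Mx lst (-1)), k0) :: (-(Mx lst (-1)), k1)
                :: (-(Mx lst (-1)), k2) :: ((K3.map (fun i => (-(Mx lst (-1)), i))) ++ d) := by
              rw [hE, hK]; rfl
            have hcond : ((-(Mx lst (-1)) : Int) != (-(Mx lst (-1)) : Int)) = false := by simp
            have htail : ((-(Mx lst (-1)), k1) :: (-(Mx lst (-1)), k2)
                :: ((K3.map (fun i => (-(Mx lst (-1)), i))) ++ d)).Pairwise lexle := by
              have := hs
              rw [hEe] at this
              exact (List.pairwise_cons.mp this).2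
            have hperm0 : (((-(Mx lst (-1)), k0) : Int × Nat) :: ((-(Mx lst (-1)), k1)
                :: (-(Mx lst (-1)), k2) :: ((K3.map (fun i => (-(Mx lst (-1)), i))) ++ d))).Perm
                (PPairs lst) := by
              rw [← hEe]; exact hP
            have hred := hsingle k0 _ hk0.1 hk0.2 htail hperm0
              (exits ++ [String.ofList [Char.ofNat (k0 + 65)]])
            simp only [senateLoopA, senateLoopB, hEe, if_pos hpos, hvals,
              BEq.rfl, Bool.true_and, hcond]
            exact hred
    · simp only [senateLoopA, senateLoopB, if_neg hpos]

-- ===== VERDICT (by name: the statement is the Claim_ definition above) =====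
theorem senate_evac_spec : Claim_equal_senate_evac := by
  intro lst _
  unfold Spec_senate_evac senate_evac senate_evac_alt
  rw [← sumA_eq_sum, loop_eq _ _ _ _ (build_sorted lst) (build_perm lst)]
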